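-- pv_equiv track=rewrite | github.com/FeiYe0310/SparseFusion | lib/async_shard.py | _compute_shard_slices
-- ===== SOURCE A (Python) =====
-- from typing import List, Sequence, Tuple
--
-- def _compute_shard_slices(num_params: int, num_nodes: int) -> List[Tuple[int, int]]:
--     """Evenly split parameter indices across ``num_nodes`` slices."""
--     base = num_params // num_nodes
--     remainder = num_params % num_nodes
--     slices: List[Tuple[int, int]] = []
--     start = 0
--     for idx in range(num_nodes):
--         extra = 1 if idx < remainder else 0
--         end = start + base + extra
--         slices.append((start, end))
--         start = end
--     return slices
-- ===== SOURCE B (Python) =====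
-- from typing import List, Tuple
--
-- def _compute_shard_slices(num_params: int, num_nodes: int) -> List[Tuple[int, int]]:
--     """Evenly split parameter indices across ``num_nodes`` slices."""
--     base, remainder = divmod(num_params, num_nodes)
--     return [
--         (i * base + min(i, remainder), (i + 1) * base + min(i + 1, remainder))
--         for i in range(num_nodes)
--     ]
-- ===== Notes on version B (the rewrite author's own statement) =====
-- stated objective: simpler
-- what changed: Replaces the sequential loop carrying a running 'start' accumulator with a closed-form comprehension computing each slice's boundaries independently as i*base + min(i, remainder).
import Mathlib
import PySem

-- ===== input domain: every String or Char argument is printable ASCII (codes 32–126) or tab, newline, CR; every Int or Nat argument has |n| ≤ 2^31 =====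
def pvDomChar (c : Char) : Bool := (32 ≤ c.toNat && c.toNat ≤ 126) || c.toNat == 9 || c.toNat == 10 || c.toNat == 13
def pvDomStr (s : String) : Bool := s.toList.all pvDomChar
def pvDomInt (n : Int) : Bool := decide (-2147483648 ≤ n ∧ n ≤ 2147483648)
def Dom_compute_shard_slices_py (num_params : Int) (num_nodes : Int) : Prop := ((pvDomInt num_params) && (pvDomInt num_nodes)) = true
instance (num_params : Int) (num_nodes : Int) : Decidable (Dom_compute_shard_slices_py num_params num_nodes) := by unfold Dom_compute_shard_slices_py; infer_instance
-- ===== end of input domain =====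

-- B replaces A's running-start accumulator loop with a closed-form map over the same range;
-- equivalence is proved outside num_nodes = 0, where A raises ZeroDivisionError.


-- ===== PORT A =====
def compute_shard_slices_py (num_params : Int) (num_nodes : Int) : List (Int × Int) :=
  let base := PySem.Int.floordiv num_params num_nodes
  let remainder := PySem.Int.mod num_params num_nodes
  ((PySem.List.pyRange 0 num_nodes 1).foldl
    (fun (st : List (Int × Int) × Int) idx =>
      let extra : Int := if idx < remainder then 1 else 0
      let e := st.2 + base + extra
      (st.1 ++ [(st.2, e)], e)) ([], 0)).1

-- ===== PORT B =====
def compute_shard_slices_py_alt (num_params : Int) (num_nodes : Int) : List (Int × Int) :=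
  let base := PySem.Int.floordiv num_params num_nodes
  let remainder := PySem.Int.mod num_params num_nodes
  (PySem.List.pyRange 0 num_nodes 1).map (fun i =>
    (i * base + min i remainder, (i + 1) * base + min (i + 1) remainder))

-- ===== PRECONDITION & SPEC =====
-- Pre_ excludes exactly num_nodes = 0, where Python A raises ZeroDivisionError.
def Pre_compute_shard_slices_py (num_params : Int) (num_nodes : Int) : Prop := num_nodes ≠ 0
instance (num_params : Int) (num_nodes : Int) : Decidable (Pre_compute_shard_slices_py num_params num_nodes) := by unfold Pre_compute_shard_slices_py; infer_instance
def pvWitness_compute_shard_slices_py : Int × Int := (10, 3)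

def Spec_compute_shard_slices_py (num_params : Int) (num_nodes : Int) (out : List (Int × Int)) : Prop := out = compute_shard_slices_py_alt num_params num_nodes
instance (num_params : Int) (num_nodes : Int) (out : List (Int × Int)) : Decidable (Spec_compute_shard_slices_py num_params num_nodes out) := by unfold Spec_compute_shard_slices_py; infer_instance

-- ===== CLAIM (what is proved, stated in full; the proofs are below) =====
def Claim_equal_compute_shard_slices_py : Prop := ∀ (num_params : Int) (num_nodes : Int), Dom_compute_shard_slices_py num_params num_nodes → Pre_compute_shard_slices_py num_params num_nodes → Spec_compute_shard_slices_py num_params num_nodes (compute_shard_slices_py num_params num_nodes)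

-- ===== LEMMAS AND PROOFS =====

-- Loop invariant: after folding over range(0, k), the accumulator holds B's closed-form
-- slices for indices < k and the running start equals k*base + min k remainder.
theorem shard_fold_invariant (base remainder : Int) (hrem : 0 ≤ remainder) (k : Nat) :
    ((PySem.List.pyRange 0 (k : Int) 1).foldl
      (fun (st : List (Int × Int) × Int) idx =>
        let extra : Int := if idx < remainder then 1 else 0
        let e := st.2 + base + extra
        (st.1 ++ [(st.2, e)], e)) ([], 0))
    = ((PySem.List.pyRange 0 (k : Int) 1).map (fun i =>
        (i * base + min i remainder, (i + 1) * base + min (i + 1) remainder)),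
       (k : Int) * base + min (k : Int) remainder) := by
  induction k with
  | zero => simp [PySem.List.pyRange_one_eq_nil, hrem]
  | succ n ih =>
    have h1 : (0 : Int) ≤ (n : Int) := by exact_mod_cast Nat.zero_le n
    have hsplit := PySem.List.pyRange_one_succ_right h1
    push_cast
    rw [hsplit, List.foldl_append, List.map_append, ih]
    simp only [List.foldl_cons, List.foldl_nil, List.map_cons, List.map_nil]
    refine Prod.ext ?_ ?_ <;>
      by_cases h : (n : Int) < remainder <;>
      simp [h, min_def] <;> split_ifs <;> ring_nf <;> omega

-- ===== VERDICT (by name: the statement is the Claim_ definition above) =====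
theorem compute_shard_slices_py_spec : Claim_equal_compute_shard_slices_py := by
  intro num_params num_nodes _ hpre
  unfold Spec_compute_shard_slices_py compute_shard_slices_py compute_shard_slices_py_alt
  by_cases hpos : 0 < num_nodes
  · obtain ⟨k, rfl⟩ : ∃ k : Nat, num_nodes = (k : Int) := ⟨num_nodes.toNat, by omega⟩
    have hrem : 0 ≤ PySem.Int.mod num_params (k : Int) := PySem.Int.mod_nonneg _ hpos
    dsimp only
    exact congrArg Prod.fst
      (shard_fold_invariant (PySem.Int.floordiv num_params (k : Int))
        (PySem.Int.mod num_params (k : Int)) hrem k)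
  · have : num_nodes ≤ 0 := by omega
    simp [PySem.List.pyRange_one_eq_nil this]
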